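-- pv_equiv track=rewrite | github.com/timg4/NLP-Group-23 | archive/milestone2/stratified_split.py | _sentence_stratum
-- ===== SOURCE A (Python) =====
-- from typing import Dict, List, Tuple
--
-- def _sentence_stratum(labels: List[str]) -> str:
--     if any(lab.endswith("-MON") for lab in labels):
--         return "MON"
--     if any(lab.endswith("-LEG") for lab in labels):
--         return "LEG"
--     if any(lab.endswith("-ORG") for lab in labels):
--         return "ORG"
--     return "NONE"
-- ===== SOURCE B (Python) =====
-- from typing import Dict, List, Tuple
--
-- def _sentence_stratum(labels: List[str]) -> str:
--     mon = leg = org = False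
--     for lab in labels:
--         mon = mon or lab.endswith("-MON")
--         leg = leg or lab.endswith("-LEG")
--         org = org or lab.endswith("-ORG")
--     return "MON" if mon else "LEG" if leg else "ORG" if org else "NONE"
-- ===== Notes on version B (the rewrite author's own statement) =====
-- stated objective: alternative
-- what changed: Replaces A's three separate short-circuiting any-scans with a single pass over labels that accumulates three presence flags, resolved by priority after the loop (one traversal instead of up to three).
import Mathlib
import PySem

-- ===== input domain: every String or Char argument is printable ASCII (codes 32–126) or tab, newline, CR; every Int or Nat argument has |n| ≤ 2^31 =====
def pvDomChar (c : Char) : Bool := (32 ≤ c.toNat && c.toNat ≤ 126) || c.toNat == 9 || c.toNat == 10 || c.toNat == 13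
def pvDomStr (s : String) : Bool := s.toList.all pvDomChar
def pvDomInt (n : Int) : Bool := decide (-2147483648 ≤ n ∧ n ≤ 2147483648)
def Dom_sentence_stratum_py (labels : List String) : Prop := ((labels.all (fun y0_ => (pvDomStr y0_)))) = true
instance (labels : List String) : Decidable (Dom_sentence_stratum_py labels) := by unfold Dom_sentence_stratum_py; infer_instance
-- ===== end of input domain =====

-- B replaces A's three short-circuiting any-scans with one pass accumulating three flags, resolved by priority after the loop (objective: alternative; return values identical).

-- ===== PORT A =====
def sentence_stratum_py (labels : List String) : String :=
  if labels.any (fun lab => PySem.Str.endswith lab "-MON") then "MON"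
  else if labels.any (fun lab => PySem.Str.endswith lab "-LEG") then "LEG"
  else if labels.any (fun lab => PySem.Str.endswith lab "-ORG") then "ORG"
  else "NONE"

-- ===== PORT B =====
def sentence_stratum_py_alt (labels : List String) : String :=
  let st := labels.foldl
    (fun (st : Bool × Bool × Bool) lab =>
      (st.1 || PySem.Str.endswith lab "-MON",
       st.2.1 || PySem.Str.endswith lab "-LEG",
       st.2.2 || PySem.Str.endswith lab "-ORG"))
    (false, false, false)
  if st.1 then "MON" else if st.2.1 then "LEG" else if st.2.2 then "ORG" else "NONE"

-- ===== PRECONDITION & SPEC =====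
def Spec_sentence_stratum_py (labels : List String) (out : String) : Prop := out = sentence_stratum_py_alt labels
instance (labels : List String) (out : String) : Decidable (Spec_sentence_stratum_py labels out) := by unfold Spec_sentence_stratum_py; infer_instance

-- ===== CLAIM (what is proved, stated in full; the proofs are below) =====
def Claim_equal_sentence_stratum_py : Prop := ∀ (labels : List String), Dom_sentence_stratum_py labels → Spec_sentence_stratum_py labels (sentence_stratum_py labels)

-- ===== LEMMAS AND PROOFS =====

-- The fold's three flags are exactly the three 'any' scans, for every initial state.
theorem fold_flags (labels : List String) (st : Bool × Bool × Bool) :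
    labels.foldl
      (fun (st : Bool × Bool × Bool) lab =>
        (st.1 || PySem.Str.endswith lab "-MON",
         st.2.1 || PySem.Str.endswith lab "-LEG",
         st.2.2 || PySem.Str.endswith lab "-ORG"))
      st
    = (st.1 || labels.any (fun lab => PySem.Str.endswith lab "-MON"),
       st.2.1 || labels.any (fun lab => PySem.Str.endswith lab "-LEG"),
       st.2.2 || labels.any (fun lab => PySem.Str.endswith lab "-ORG")) := by
  induction labels generalizing st with
  | nil => simp
  | cons h t ih => rw [List.foldl_cons, ih]; simp [Bool.or_assoc]

-- ===== VERDICT (by name: the statement is the Claim_ definition above) =====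
theorem sentence_stratum_py_spec : Claim_equal_sentence_stratum_py := by
  intro labels _
  unfold Spec_sentence_stratum_py sentence_stratum_py sentence_stratum_py_alt
  rw [fold_flags]
  simp
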